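-- pv_equiv track=rewrite | github.com/asashepard/aspectcode | server/engine/csharp_resolver.py | _is_stdlib
-- ===== SOURCE A (Python) =====
-- DOTNET_STDLIB_NAMESPACES = {
--     # System namespaces
--     'System', 'System.Collections', 'System.Collections.Generic',
--     'System.Collections.Concurrent', 'System.Collections.ObjectModel',
--     'System.ComponentModel', 'System.Configuration', 'System.Data',
--     'System.Diagnostics', 'System.Drawing', 'System.Dynamic',
--     'System.Globalization', 'System.IO', 'System.IO.Compression',
--     'System.Linq', 'System.Media', 'System.Net', 'System.Net.Http',
--     'System.Numerics', 'System.Reflection', 'System.Resources',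
--     'System.Runtime', 'System.Runtime.CompilerServices',
--     'System.Runtime.InteropServices', 'System.Security',
--     'System.Security.Cryptography', 'System.Text', 'System.Text.Json',
--     'System.Text.RegularExpressions', 'System.Threading',
--     'System.Threading.Tasks', 'System.Web', 'System.Windows',
--     'System.Xml', 'System.Xml.Linq',
--     # Microsoft namespaces
--     'Microsoft.CSharp', 'Microsoft.Extensions', 'Microsoft.Win32',
--     'Microsoft.VisualBasic',
-- }
--
-- def _is_stdlib(using_spec: str) -> bool:
--     """Check if using is from .NET standard library."""
--     # System.* namespaces are stdlib
--     if using_spec.startswith('System.') or using_spec == 'System':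
--         return True
--
--     # Microsoft.* base namespaces
--     if using_spec.startswith('Microsoft.CSharp') or using_spec.startswith('Microsoft.Win32'):
--         return True
--
--     # Check against known stdlib namespaces
--     for ns in DOTNET_STDLIB_NAMESPACES:
--         if using_spec.startswith(ns + '.') or using_spec == ns:
--             return True
--
--     return False
-- ===== SOURCE B (Python) =====
-- DOTNET_STDLIB_NAMESPACES = {
--     # System namespaces
--     'System', 'System.Collections', 'System.Collections.Generic',
--     'System.Collections.Concurrent', 'System.Collections.ObjectModel',
--     'System.ComponentModel', 'System.Configuration', 'System.Data',
--     'System.Diagnostics', 'System.Drawing', 'System.Dynamic',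
--     'System.Globalization', 'System.IO', 'System.IO.Compression',
--     'System.Linq', 'System.Media', 'System.Net', 'System.Net.Http',
--     'System.Numerics', 'System.Reflection', 'System.Resources',
--     'System.Runtime', 'System.Runtime.CompilerServices',
--     'System.Runtime.InteropServices', 'System.Security',
--     'System.Security.Cryptography', 'System.Text', 'System.Text.Json',
--     'System.Text.RegularExpressions', 'System.Threading',
--     'System.Threading.Tasks', 'System.Web', 'System.Windows',
--     'System.Xml', 'System.Xml.Linq',
--     # Microsoft namespaces
--     'Microsoft.CSharp', 'Microsoft.Extensions', 'Microsoft.Win32',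
--     'Microsoft.VisualBasic',
-- }
--
--
-- def _is_stdlib(using_spec: str) -> bool:
--     """Check if using is from .NET standard library."""
--     if using_spec.startswith('System.') or using_spec == 'System':
--         return True
--     if using_spec.startswith('Microsoft.CSharp') or using_spec.startswith('Microsoft.Win32'):
--         return True
--     # Instead of scanning the whole namespace set with startswith, enumerate the
--     # dotted prefixes of using_spec (text before each '.', plus the whole spec)
--     # and look each one up in the set.
--     prefixes = [using_spec[:i] for i, ch in enumerate(using_spec) if ch == '.'] + [using_spec]
--     return any(p in DOTNET_STDLIB_NAMESPACES for p in prefixes)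
-- ===== Notes on version B (the rewrite author's own statement) =====
-- stated objective: alternative
-- what changed: Keeps the two broad guards but replaces the scan over all 39 stdlib namespaces with startswith tests by a single pass over the input that collects its dotted prefixes and looks each one up in the set.
import Mathlib
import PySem

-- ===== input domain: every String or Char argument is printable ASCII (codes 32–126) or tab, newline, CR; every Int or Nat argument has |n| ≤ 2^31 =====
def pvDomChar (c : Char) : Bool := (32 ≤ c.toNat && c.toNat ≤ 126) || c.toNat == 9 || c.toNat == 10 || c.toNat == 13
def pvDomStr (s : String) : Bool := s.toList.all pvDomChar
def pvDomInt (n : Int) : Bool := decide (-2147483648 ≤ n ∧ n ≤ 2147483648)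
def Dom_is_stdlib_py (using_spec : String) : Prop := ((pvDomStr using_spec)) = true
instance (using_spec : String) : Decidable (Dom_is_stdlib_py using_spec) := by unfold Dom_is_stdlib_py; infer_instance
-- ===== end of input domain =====

-- B replaces A's scan over the whole namespace set by one pass over the input
-- collecting its dotted prefixes and membership-testing each (objective: alternative).

-- ===== PORT A =====
-- Python set literal; used only for order-independent operations (any / membership)
def dotnetStdlibNamespaces : PySem.Set String := PySem.Set.ofList
  [ "System", "System.Collections", "System.Collections.Generic",
    "System.Collections.Concurrent", "System.Collections.ObjectModel",
    "System.ComponentModel", "System.Configuration", "System.Data",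
    "System.Diagnostics", "System.Drawing", "System.Dynamic",
    "System.Globalization", "System.IO", "System.IO.Compression",
    "System.Linq", "System.Media", "System.Net", "System.Net.Http",
    "System.Numerics", "System.Reflection", "System.Resources",
    "System.Runtime", "System.Runtime.CompilerServices",
    "System.Runtime.InteropServices", "System.Security",
    "System.Security.Cryptography", "System.Text", "System.Text.Json",
    "System.Text.RegularExpressions", "System.Threading",
    "System.Threading.Tasks", "System.Web", "System.Windows",
    "System.Xml", "System.Xml.Linq",
    "Microsoft.CSharp", "Microsoft.Extensions", "Microsoft.Win32",
    "Microsoft.VisualBasic" ]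

-- the for-loop with early `return True` over a set: result is an order-independent any
def is_stdlib_py (using_spec : String) : Bool :=
  if PySem.Str.startswith using_spec "System." || using_spec == "System" then true
  else if PySem.Str.startswith using_spec "Microsoft.CSharp" || PySem.Str.startswith using_spec "Microsoft.Win32" then true
  else dotnetStdlibNamespaces.any (fun ns => PySem.Str.startswith using_spec (ns ++ ".") || using_spec == ns)

-- ===== PORT B =====
def is_stdlib_py_alt (using_spec : String) : Bool :=
  if PySem.Str.startswith using_spec "System." || using_spec == "System" then true
  else if PySem.Str.startswith using_spec "Microsoft.CSharp" || PySem.Str.startswith using_spec "Microsoft.Win32" then true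
  else
    let prefixes : List String :=
      ((PySem.List.enumerate using_spec.toList 0).filter (fun ic => ic.2 == '.')).map
        (fun ic => PySem.Str.slice using_spec none (some ic.1)) ++ [using_spec]
    prefixes.any (fun p => PySem.Set.contains dotnetStdlibNamespaces p)

-- ===== PRECONDITION & SPEC =====
def Spec_is_stdlib_py (using_spec : String) (out : Bool) : Prop := out = is_stdlib_py_alt using_spec
instance (using_spec : String) (out : Bool) : Decidable (Spec_is_stdlib_py using_spec out) := by unfold Spec_is_stdlib_py; infer_instance

-- ===== CLAIM (what is proved, stated in full; the proofs are below) =====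
def Claim_equal_is_stdlib_py : Prop := ∀ (using_spec : String), Dom_is_stdlib_py using_spec → Spec_is_stdlib_py using_spec (is_stdlib_py using_spec)

-- ===== LEMMAS AND PROOFS =====

-- a list of chars ending in '.' is a prefix of l iff it is `take k` at a position k holding '.'
lemma prefix_dot_iff (p l : List Char) :
    (p ++ ['.'] <+: l) ↔ ∃ k, ∃ h : k < l.length, l[k] = '.' ∧ p = l.take k := by
  constructor
  · rintro ⟨t, ht⟩
    refine ⟨p.length, ?_, ?_, ?_⟩ <;> subst ht <;> simp
  · rintro ⟨k, hk, hdot, rfl⟩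
    refine ⟨l.drop (k+1), ?_⟩
    have h1 : l.drop k = l[k] :: l.drop (k+1) := List.drop_eq_getElem_cons hk
    calc l.take k ++ ['.'] ++ l.drop (k+1)
        = l.take k ++ ('.' :: l.drop (k+1)) := by simp
      _ = l.take k ++ l.drop k := by rw [h1, hdot]
      _ = l := List.take_append_drop k l

-- ns is in B's dotted-prefix list iff A's per-namespace test fires on ns
lemma mem_prefixes_iff (s ns : String) :
    ns ∈ (((PySem.List.enumerate s.toList 0).filter (fun ic => ic.2 == '.')).map
        (fun ic => PySem.Str.slice s none (some ic.1)) ++ [s]) ↔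
    (PySem.Str.startswith s (ns ++ ".") = true ∨ s == ns) := by
  have hsw : PySem.Str.startswith s (ns ++ ".") = true ↔ ns.toList ++ ['.'] <+: s.toList := by
    rw [PySem.Str.startswith_eq, PySem.Chars.startswith_iff]
    simp
  constructor
  · intro hmem
    rcases List.mem_append.1 hmem with hmap | hlast
    · left
      rcases List.mem_map.1 hmap with ⟨ic, hf, hslice⟩
      rcases List.mem_filter.1 hf with ⟨hen, hc⟩
      rcases (PySem.List.mem_enumerate_iff _ _ _).1 hen with ⟨k, hk, hik⟩
      have hi : ic.1 = 0 + (k : Int) := by rw [hik]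
      have hcv : ic.2 = s.toList[k] := by rw [hik]
      have hdot : s.toList[k] = '.' := by rw [← hcv]; exact beq_iff_eq.1 hc
      have hptl : ns.toList = s.toList.take k := by
        rw [← hslice, hi]
        simp [PySem.Str.toList_slice, PySem.List.slice_to_natCast]
      exact hsw.2 ((prefix_dot_iff _ _).2 ⟨k, hk, hdot, hptl⟩)
    · right
      have : ns = s := List.mem_singleton.1 hlast
      exact beq_iff_eq.2 this.symm
  · rintro (hpre | heq)
    · rcases (prefix_dot_iff _ _).1 (hsw.1 hpre) with ⟨k, hk, hdot, htake⟩
      apply List.mem_append.2; left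
      apply List.mem_map.2
      refine ⟨((0 : Int) + (k : Int), '.'), ?_, ?_⟩
      · apply List.mem_filter.2
        refine ⟨(PySem.List.mem_enumerate_iff _ _ _).2 ⟨k, hk, ?_⟩, by simp⟩
        rw [hdot]
      · apply String.toList_injective
        simp [PySem.Str.toList_slice, PySem.List.slice_to_natCast, htake]
    · exact List.mem_append.2 (Or.inr (List.mem_singleton.2 (beq_iff_eq.1 heq).symm))

lemma core (s : String) : is_stdlib_py s = is_stdlib_py_alt s := by
  unfold is_stdlib_py is_stdlib_py_alt
  split
  · rfl
  split
  · rfl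
  apply Bool.eq_iff_iff.2
  rw [List.any_eq_true, List.any_eq_true]
  constructor
  · rintro ⟨ns, hns, hpred⟩
    refine ⟨ns, (mem_prefixes_iff s ns).2 (Bool.or_eq_true _ _ ▸ hpred), ?_⟩
    simpa [PySem.Set.contains] using hns
  · rintro ⟨p, hp, hmem⟩
    refine ⟨p, by simpa [PySem.Set.contains] using hmem, ?_⟩
    exact Bool.or_eq_true _ _ ▸ ((mem_prefixes_iff s p).1 hp)

-- ===== VERDICT (by name: the statement is the Claim_ definition above) =====
theorem is_stdlib_py_spec : Claim_equal_is_stdlib_py := by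
  intro s _
  unfold Spec_is_stdlib_py
  exact core s
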